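-- pv_equiv track=rewrite | github.com/softkleenex/workspace | studying_25.02.13~/13413.py | check
-- ===== SOURCE A (Python) =====
-- from collections import Counter
--
-- def check(now, target):
--     jobs = 0
--
--     #다른거 2개에 대해서 < 그 돌들의 색깔이 다르면 서로서로 바꾸면 되잖아?
--     diff = list(zip(now, target))
--     diff = Counter([x[0] for x in diff if x[0] != x[1]])
--     while diff['B'] >= 1 and diff['W'] >= 1:
--         jobs += 1
--         diff['B'] -= 1
--         diff['W'] -= 1
--
--     while diff['B'] >= 1:
--         jobs += 1
--         diff['B'] -= 1
--
--     while diff['W'] >= 1: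
--         jobs += 1
--         diff['W'] -= 1
--
--     return jobs
-- ===== SOURCE B (Python) =====
-- def check(now, target):
--     b = sum(1 for x, y in zip(now, target) if x != y and x == 'B')
--     w = sum(1 for x, y in zip(now, target) if x != y and x == 'W')
--     return max(b, w)
-- ===== Notes on version B (the rewrite author's own statement) =====
-- stated objective: simpler
-- what changed: Replaces the Counter plus three decrementing while-loops by directly counting 'B'-side and 'W'-side mismatches over zip(now,target) and returning max(b,w), which is what the loop cascade computes.
import Mathlib
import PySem

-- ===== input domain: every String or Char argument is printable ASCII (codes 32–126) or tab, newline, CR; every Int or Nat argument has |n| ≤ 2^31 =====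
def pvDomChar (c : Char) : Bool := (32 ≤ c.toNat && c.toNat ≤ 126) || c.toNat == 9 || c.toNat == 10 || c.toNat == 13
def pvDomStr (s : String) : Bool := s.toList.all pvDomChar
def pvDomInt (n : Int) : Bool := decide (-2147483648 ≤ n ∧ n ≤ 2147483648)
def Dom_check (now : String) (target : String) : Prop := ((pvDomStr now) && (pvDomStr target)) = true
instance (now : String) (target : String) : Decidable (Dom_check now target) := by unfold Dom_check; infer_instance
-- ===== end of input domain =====

-- B replaces the Counter and three decrementing while-loops by a direct count of
-- 'B'-side and 'W'-side mismatches and returns max(b, w); same value, simpler code.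


-- ===== PORT A =====
-- while diff['B'] >= 1 and diff['W'] >= 1: jobs += 1; diff['B'] -= 1; diff['W'] -= 1
def checkLoopBW (b w jobs : Int) : Int × Int × Int :=
  if 1 ≤ b ∧ 1 ≤ w then checkLoopBW (b - 1) (w - 1) (jobs + 1) else (b, w, jobs)
termination_by b.toNat
decreasing_by omega

-- while diff[c] >= 1: jobs += 1; diff[c] -= 1   (used for the 'B' loop and then the 'W' loop)
def checkLoop1 (b jobs : Int) : Int × Int :=
  if 1 ≤ b then checkLoop1 (b - 1) (jobs + 1) else (b, jobs)
termination_by b.toNat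
decreasing_by omega

def check (now : String) (target : String) : Int :=
  let diffPairs := now.toList.zip target.toList
  let diff := PySem.Dict.counter ((diffPairs.filter (fun x => x.1 != x.2)).map (·.1))
  let s1 := checkLoopBW (diff.getD 'B' 0) (diff.getD 'W' 0) 0
  let s2 := checkLoop1 s1.1 s1.2.2
  let s3 := checkLoop1 s1.2.1 s2.2
  s3.2

-- ===== PORT B =====
def check_alt (now : String) (target : String) : Int :=
  let pairs := now.toList.zip target.toList
  let b := pairs.countP (fun p => p.1 != p.2 && p.1 == 'B')
  let w := pairs.countP (fun p => p.1 != p.2 && p.1 == 'W')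
  max (b : Int) (w : Int)

-- ===== PRECONDITION & SPEC =====
def Spec_check (now : String) (target : String) (out : Int) : Prop := out = check_alt now target
instance (now : String) (target : String) (out : Int) : Decidable (Spec_check now target out) := by unfold Spec_check; infer_instance

-- ===== CLAIM (what is proved, stated in full; the proofs are below) =====
def Claim_equal_check : Prop := ∀ (now : String) (target : String), Dom_check now target → Spec_check now target (check now target)

-- ===== LEMMAS AND PROOFS =====

theorem checkLoopBW_eq (b w jobs : Int) (hb : 0 ≤ b) (hw : 0 ≤ w) :
    checkLoopBW b w jobs = (b - min b w, w - min b w, jobs + min b w) := by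
  by_cases h : 1 ≤ b ∧ 1 ≤ w
  · rw [checkLoopBW, if_pos h,
      checkLoopBW_eq (b - 1) (w - 1) (jobs + 1) (by omega) (by omega)]
    have : min (b - 1) (w - 1) = min b w - 1 := by omega
    rw [this]
    simp only [Prod.mk.injEq]
    refine ⟨by omega, by omega, by omega⟩
  · rw [checkLoopBW, if_neg h]
    have : min b w = 0 := by omega
    simp [this]
termination_by b.toNat
decreasing_by omega

theorem checkLoop1_eq (b jobs : Int) (hb : 0 ≤ b) :
    checkLoop1 b jobs = (0, jobs + b) := by
  by_cases h : 1 ≤ b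
  · rw [checkLoop1, if_pos h, checkLoop1_eq (b - 1) (jobs + 1) (by omega)]
    simp only [Prod.mk.injEq]
    exact ⟨trivial, by omega⟩
  · rw [checkLoop1, if_neg h]
    have : b = 0 := by omega
    simp [this]
termination_by b.toNat
decreasing_by omega

theorem count_filter_eq (pairs : List (Char × Char)) (c : Char) :
    ((pairs.filter (fun x => x.1 != x.2)).map (·.1)).count c
      = pairs.countP (fun p => p.1 != p.2 && p.1 == c) := by
  rw [List.count, List.countP_map, List.countP_filter]
  apply List.countP_congr
  intro p _
  simp [Function.comp]
  tauto

theorem check_spec_aux (now target : String) : check now target = check_alt now target := by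
  unfold check check_alt
  simp only [PySem.Dict.getD_counter, count_filter_eq]
  set pairs := now.toList.zip target.toList
  set b := pairs.countP (fun p => p.1 != p.2 && p.1 == 'B') with hb
  set w := pairs.countP (fun p => p.1 != p.2 && p.1 == 'W') with hw
  rw [checkLoopBW_eq _ _ _ (by positivity) (by positivity)]
  simp only []
  rw [checkLoop1_eq _ _ (by omega), checkLoop1_eq _ _ (by omega)]
  simp only []
  omega

-- ===== VERDICT (by name: the statement is the Claim_ definition above) =====
theorem check_spec : Claim_equal_check := by
  intro now target _
  unfold Spec_check
  exact check_spec_aux now target
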